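-- pv_equiv track=rewrite | github.com/MatthijsdeJ/GNN_PN_Imitation_Learning | auxiliary/grid2op_util.py | tv_groupby_subst
-- ===== SOURCE A (Python) =====
-- from typing import Sequence, Tuple, List, Optional, Callable, Dict
--
-- def tv_groupby_subst(tv: Sequence, sub_info: Sequence[int]) -> \
--         List[Sequence]:
--     """
--     Group a sequence the shape of the topology vector by the substations.
--
--     Parameters
--     ----------
--     tv : Sequence
--         Sequence the shape of the topology vector.
--     sub_info : Sequence[int]
--         Sequence with elements containing the number of object connected to each substation.
--
--     Returns
--     -------
--     List[Sequence]
--         List, each element corresponding to a Sequence of objects in tv that belong to a particular substation.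
--     """
--     i = 0
--     gs = []
--     for ss in sub_info:
--         gs.append(tv[i:i + ss])
--         i += ss
--     return gs
-- ===== SOURCE B (Python) =====
-- def tv_groupby_subst(tv, sub_info):
--     # Two-stage: first build the table of cumulative boundaries, then
--     # slice between adjacent boundary pairs.
--     offsets = [0]
--     t = 0
--     for ss in sub_info:
--         t += ss
--         offsets.append(t)
--     return [tv[a:b] for a, b in zip(offsets, offsets[1:])]
-- ===== Notes on version B (the rewrite author's own statement) =====
-- stated objective: alternative
-- what changed: B first builds a cumulative-boundary table and then maps a slice over adjacent boundary pairs, instead of threading a running index through a single append loop.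
import Mathlib
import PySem

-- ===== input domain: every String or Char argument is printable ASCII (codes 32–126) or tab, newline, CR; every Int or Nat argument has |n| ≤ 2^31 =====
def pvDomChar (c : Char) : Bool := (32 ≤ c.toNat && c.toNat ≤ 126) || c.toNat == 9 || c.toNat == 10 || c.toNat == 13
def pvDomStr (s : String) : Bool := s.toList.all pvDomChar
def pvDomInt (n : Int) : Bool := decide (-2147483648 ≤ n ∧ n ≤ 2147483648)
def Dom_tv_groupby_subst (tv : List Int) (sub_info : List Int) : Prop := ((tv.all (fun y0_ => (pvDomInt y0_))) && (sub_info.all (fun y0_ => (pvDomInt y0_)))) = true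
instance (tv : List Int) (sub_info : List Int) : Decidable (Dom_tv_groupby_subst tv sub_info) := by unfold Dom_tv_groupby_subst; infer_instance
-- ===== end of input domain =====

-- ===== PORT A =====
-- B differs from A only in decomposition (boundary table + slice map vs a running-index loop); equivalence is exact and total.
def tv_groupby_subst (tv : List Int) (sub_info : List Int) : List (List Int) :=
  (sub_info.foldl
    (fun (st : Int × List (List Int)) ss =>
      (st.1 + ss, st.2 ++ [PySem.List.slice tv (some st.1) (some (st.1 + ss))]))
    (0, [])).2

-- ===== PORT B =====
def tv_groupby_subst_alt (tv : List Int) (sub_info : List Int) : List (List Int) :=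
  let offsets :=
    (sub_info.foldl
      (fun (st : List Int × Int) ss => (st.1 ++ [st.2 + ss], st.2 + ss))
      ([0], 0)).1
  (offsets.zip (offsets.drop 1)).map
    (fun ab => PySem.List.slice tv (some ab.1) (some ab.2))

-- ===== PRECONDITION & SPEC =====
def Spec_tv_groupby_subst (tv : List Int) (sub_info : List Int) (out : List (List Int)) : Prop := out = tv_groupby_subst_alt tv sub_info
instance (tv : List Int) (sub_info : List Int) (out : List (List Int)) : Decidable (Spec_tv_groupby_subst tv sub_info out) := by unfold Spec_tv_groupby_subst; infer_instance

-- ===== CLAIM (what is proved, stated in full; the proofs are below) =====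
def Claim_equal_tv_groupby_subst : Prop := ∀ (tv : List Int) (sub_info : List Int), Dom_tv_groupby_subst tv sub_info → Spec_tv_groupby_subst tv sub_info (tv_groupby_subst tv sub_info)

-- ===== LEMMAS AND PROOFS =====

-- the tail of the boundary table: partial sums starting from t (exclusive of t)
def pvOffs (t : Int) : List Int → List Int
  | [] => []
  | ss :: r => (t + ss) :: pvOffs (t + ss) r

theorem pvOffsets_fst (l : List Int) : ∀ (pre : List Int) (t : Int),
    (l.foldl (fun (st : List Int × Int) ss => (st.1 ++ [st.2 + ss], st.2 + ss)) (pre, t)).1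
      = pre ++ pvOffs t l := by
  induction l with
  | nil => intro pre t; simp [pvOffs]
  | cons ss r ih =>
      intro pre t
      simp only [List.foldl_cons, pvOffs]
      rw [ih]
      simp

theorem pvA_loop (tv : List Int) (l : List Int) : ∀ (t : Int) (gs : List (List Int)),
    (l.foldl
      (fun (st : Int × List (List Int)) ss =>
        (st.1 + ss, st.2 ++ [PySem.List.slice tv (some st.1) (some (st.1 + ss))]))
      (t, gs)).2
    = gs ++ ((t :: pvOffs t l).zip (pvOffs t l)).map
        (fun ab => PySem.List.slice tv (some ab.1) (some ab.2)) := by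
  induction l with
  | nil => intro t gs; simp [pvOffs]
  | cons ss r ih =>
      intro t gs
      simp only [List.foldl_cons, pvOffs, List.zip_cons_cons, List.map_cons]
      rw [ih]
      simp

-- ===== VERDICT (by name: the statement is the Claim_ definition above) =====
theorem tv_groupby_subst_spec : Claim_equal_tv_groupby_subst := by
  intro tv sub_info _
  unfold Spec_tv_groupby_subst tv_groupby_subst tv_groupby_subst_alt
  rw [pvA_loop, pvOffsets_fst]
  simp
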